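-- pv_equiv track=rewrite | github.com/emaldos/LOYA-Note | Cores/Settings.py | _apply_change
-- ===== SOURCE A (Python) =====
-- def _norm(s):return (str(s) if s is not None else "").replace("\x00","").strip()
--
-- def _dedupe_tags(tags):
--     out=[];seen=set()
--     for t in tags or []:
--         tt=_norm(t)
--         if not tt:continue
--         k=tt.lower()
--         if k in seen:continue
--         seen.add(k);out.append(tt)
--     return out
--
-- def _apply_change(tags,mode,old_set,new_tag):
--     out=[]
--     newt=_norm(new_tag)
--     for t in tags or []:
--         tl=_norm(t).lower()
--         if tl in old_set:
--             if mode in ("rename","merge") and newt:out.append(newt)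
--         else:
--             out.append(t)
--     return _dedupe_tags(out)
-- ===== SOURCE B (Python) =====
-- def _norm(s):return (str(s) if s is not None else "").replace("\x00","").strip()
--
-- def _apply_change(tags,mode,old_set,new_tag):
--     newt=_norm(new_tag)
--     keep_new=mode in ("rename","merge") and bool(newt)
--     out=[];seen=set()
--     for t in tags or []:
--         if _norm(t).lower() in old_set:
--             if not keep_new:continue
--             cand=newt
--         else:
--             cand=t
--         tt=_norm(cand)
--         if not tt:continue
--         k=tt.lower()
--         if k in seen:continue
--         seen.add(k);out.append(tt)
--     return out
-- ===== Notes on version B (the rewrite author's own statement) =====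
-- stated objective: simpler
-- what changed: Fuses A's two passes (build intermediate list, then _dedupe_tags) into one loop that applies the change and dedupes inline with an out list and a seen set; _dedupe_tags and the intermediate list disappear.
import Mathlib
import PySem

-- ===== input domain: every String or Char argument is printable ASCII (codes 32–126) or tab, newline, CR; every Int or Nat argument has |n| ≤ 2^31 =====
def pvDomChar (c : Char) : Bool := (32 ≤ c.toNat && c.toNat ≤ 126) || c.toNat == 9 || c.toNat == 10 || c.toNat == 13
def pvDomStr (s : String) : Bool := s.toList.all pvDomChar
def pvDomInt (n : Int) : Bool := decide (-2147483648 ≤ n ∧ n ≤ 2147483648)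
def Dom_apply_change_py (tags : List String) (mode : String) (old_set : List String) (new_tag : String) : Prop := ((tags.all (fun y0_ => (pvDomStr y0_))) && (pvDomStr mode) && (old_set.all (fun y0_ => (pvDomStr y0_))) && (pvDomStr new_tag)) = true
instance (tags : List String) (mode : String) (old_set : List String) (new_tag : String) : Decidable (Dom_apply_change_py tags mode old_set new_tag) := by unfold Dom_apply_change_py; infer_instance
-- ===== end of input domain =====

-- B fuses A's two passes (build changed list, then _dedupe_tags) into one loop that
-- applies the change and dedupes inline with an `out` list and a `seen` set (objective: simpler).

-- ===== PORT A =====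
-- _norm(s) for a string argument (str(s) is the identity on str)
def pyNorm (s : String) : String := PySem.Str.strip (PySem.Str.replace s "\x00" "")

-- _dedupe_tags
def dedupe_tags (tags : List String) : List String :=
  (tags.foldl (fun (st : List String × PySem.Set String) t =>
      let tt := pyNorm t
      if tt = "" then st
      else
        let k := PySem.Str.lower tt
        if PySem.Set.contains st.2 k then st
        else (st.1 ++ [tt], PySem.Set.add st.2 k))
    ([], PySem.Set.empty)).1

def apply_change_py (tags : List String) (mode : String) (old_set : List String) (new_tag : String) : List String :=
  let newt := pyNorm new_tag
  let out := tags.foldl (fun acc t =>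
      let tl := PySem.Str.lower (pyNorm t)
      if old_set.contains tl then
        if (mode = "rename" ∨ mode = "merge") ∧ newt ≠ "" then acc ++ [newt] else acc
      else acc ++ [t]) []
  dedupe_tags out

-- ===== PORT B =====
-- the inline dedupe step of B's single loop (tt=_norm(cand); skip empty/seen; append)
def altStep (st : List String × PySem.Set String) (cand : String) : List String × PySem.Set String :=
  let tt := pyNorm cand
  if tt = "" then st
  else
    let k := PySem.Str.lower tt
    if PySem.Set.contains st.2 k then st
    else (st.1 ++ [tt], PySem.Set.add st.2 k)

def apply_change_py_alt (tags : List String) (mode : String) (old_set : List String) (new_tag : String) : List String :=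
  let newt := pyNorm new_tag
  let keep_new := (mode == "rename" || mode == "merge") && (newt != "")
  (tags.foldl (fun (st : List String × PySem.Set String) t =>
      if old_set.contains (PySem.Str.lower (pyNorm t)) then
        if keep_new then altStep st newt else st
      else altStep st t)
    ([], PySem.Set.empty)).1

-- ===== PRECONDITION & SPEC =====
def Spec_apply_change_py (tags : List String) (mode : String) (old_set : List String) (new_tag : String) (out : List String) : Prop := out = apply_change_py_alt tags mode old_set new_tag
instance (tags : List String) (mode : String) (old_set : List String) (new_tag : String) (out : List String) : Decidable (Spec_apply_change_py tags mode old_set new_tag out) := by unfold Spec_apply_change_py; infer_instance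

-- ===== CLAIM (what is proved, stated in full; the proofs are below) =====
def Claim_equal_apply_change_py : Prop := ∀ (tags : List String) (mode : String) (old_set : List String) (new_tag : String), Dom_apply_change_py tags mode old_set new_tag → Spec_apply_change_py tags mode old_set new_tag (apply_change_py tags mode old_set new_tag)

-- ===== LEMMAS AND PROOFS =====

-- the 0-or-1 items A's first loop appends for tag t
def itemsOf (mode newt : String) (old_set : List String) (t : String) : List String :=
  if old_set.contains (PySem.Str.lower (pyNorm t)) then
    if (mode = "rename" ∨ mode = "merge") ∧ newt ≠ "" then [newt] else []
  else [t]

theorem buildA_eq_flatMap (mode newt : String) (old_set : List String) :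
    ∀ (tags : List String) (acc : List String),
      tags.foldl (fun acc t =>
        let tl := PySem.Str.lower (pyNorm t)
        if old_set.contains tl then
          if (mode = "rename" ∨ mode = "merge") ∧ newt ≠ "" then acc ++ [newt] else acc
        else acc ++ [t]) acc
      = acc ++ tags.flatMap (itemsOf mode newt old_set) := by
  intro tags
  induction tags with
  | nil => intro acc; simp
  | cons t ts ih =>
      intro acc
      simp only [List.foldl_cons, List.flatMap_cons, ih, itemsOf]
      split_ifs <;> simp

theorem foldl_flatMap_fuse {α β σ : Type} (f : σ → β → σ) (g : α → List β) :
    ∀ (l : List α) (s : σ),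
      List.foldl f s (l.flatMap g) = List.foldl (fun s a => List.foldl f s (g a)) s l := by
  intro l
  induction l with
  | nil => intro s; rfl
  | cons a l ih => intro s; simp [List.flatMap_cons, List.foldl_append, ih]

theorem main_eq (tags : List String) (mode : String) (old_set : List String) (new_tag : String) :
    apply_change_py tags mode old_set new_tag = apply_change_py_alt tags mode old_set new_tag := by
  simp only [apply_change_py, apply_change_py_alt, dedupe_tags]
  rw [buildA_eq_flatMap, List.nil_append,
      foldl_flatMap_fuse (fun (st : List String × PySem.Set String) t =>
        let tt := pyNorm t
        if tt = "" then st
        else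
          let k := PySem.Str.lower tt
          if PySem.Set.contains st.2 k then st
          else (st.1 ++ [tt], PySem.Set.add st.2 k)) (itemsOf mode (pyNorm new_tag) old_set)]
  congr 2
  funext st t
  simp only [itemsOf, altStep]
  by_cases h1 : PySem.Str.lower (pyNorm t) ∈ old_set
  · by_cases h2 : (mode = "rename" ∨ mode = "merge") ∧ pyNorm new_tag ≠ ""
    · have hb : ((mode == "rename" || mode == "merge") && (pyNorm new_tag != "")) = true := by
        rcases h2 with ⟨h, hne⟩
        rcases h with h | h <;> simp [h, hne]
      simp [h1, h2, hb]
    · have hb : ((mode == "rename" || mode == "merge") && (pyNorm new_tag != "")) = false := by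
        by_contra hc
        apply h2
        simp at hc
        exact ⟨by tauto, hc.2⟩
      simp [h1, h2, hb]
  · simp [h1]

-- ===== VERDICT (by name: the statement is the Claim_ definition above) =====
theorem apply_change_py_spec : Claim_equal_apply_change_py := by
  intro tags mode old_set new_tag _
  unfold Spec_apply_change_py
  exact main_eq tags mode old_set new_tag
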